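-- pv_equiv track=rewrite | github.com/aarbys/EGE-TRAINER | two.py | check_for_repetition
-- ===== SOURCE A (Python) =====
-- def check_for_repetition(problem: str):
--     string = ''
--     flag = False
--     need_to_add = False
--     for i in problem:
--         if i == ')':
--             flag = True
--             need_to_add = False
--         elif i == '(':
--             flag = False
--             need_to_add = True
--         if flag:
--             massif = string.split(' ')
--             if (massif[1] == massif[3]) or ('¬' + massif[1] == massif[3]) or ('¬' + massif[3] == massif[1]):
--                 return False
--             string = ''
--             flag = False
--         elif not flag and need_to_add:
--             string += i
--     return True
-- ===== SOURCE B (Python) =====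
-- def check_for_repetition(problem: str):
--     segments = problem.split(')')
--     for segment in segments[:-1]:
--         s = segment[segment.index('('):] if '(' in segment else ''
--         massif = s.split(' ')
--         if (massif[1] == massif[3]) or ('¬' + massif[1] == massif[3]) or ('¬' + massif[3] == massif[1]):
--             return False
--     return True
-- ===== Notes on version B (the rewrite author's own statement) =====
-- stated objective: simpler
-- what changed: A's one-pass character state machine (flag/need_to_add/accumulated string) is replaced by splitting the input on the closing parenthesis once and judging each group of segments[:-1] directly, keeping from its first opening parenthesis on.
import Mathlib
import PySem

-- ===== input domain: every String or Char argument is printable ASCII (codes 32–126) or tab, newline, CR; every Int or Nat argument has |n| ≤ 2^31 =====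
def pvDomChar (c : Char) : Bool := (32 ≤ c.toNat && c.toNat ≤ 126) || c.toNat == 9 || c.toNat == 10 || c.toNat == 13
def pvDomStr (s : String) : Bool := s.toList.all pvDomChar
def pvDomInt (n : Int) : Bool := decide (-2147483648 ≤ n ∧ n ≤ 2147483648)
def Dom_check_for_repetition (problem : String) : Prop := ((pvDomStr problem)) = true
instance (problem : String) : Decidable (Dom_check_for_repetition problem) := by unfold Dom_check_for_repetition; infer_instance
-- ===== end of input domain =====

-- B re-groups the check: instead of A's one-pass character state machine, it splits the
-- input once on ')' and judges each group directly; same return value wherever A returns (simpler; measured faster by a constant factor).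

-- shared trigger test: both Pythons run the identical 3-way comparison on the token list
def pvCond (massif : List (List Char)) : Bool :=
  massif.getD 1 [] == massif.getD 3 [] ||
  ('¬' :: massif.getD 1 []) == massif.getD 3 [] ||
  ('¬' :: massif.getD 3 []) == massif.getD 1 []

-- ===== PORT A =====
-- the for-loop over the characters, state = (string, flag, need_to_add);
-- Python raises IndexError when massif has < 4 tokens: excluded by Pre_, here .getD
def pvA_go : List Char → List Char → Bool → Bool → Bool
  | [], _string, _flag, _need => true
  | i :: rest, string, flag, need =>
    let flag1 := if i = ')' then true else if i = '(' then false else flag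
    let need1 := if i = ')' then false else if i = '(' then true else need
    if flag1 then
      let massif := PySem.Chars.splitOn string [' ']
      if pvCond massif then false
      else pvA_go rest [] false need1
    else if need1 then pvA_go rest (string ++ [i]) flag1 need1
    else pvA_go rest string flag1 need1

def check_for_repetition (problem : String) : Bool :=
  pvA_go problem.toList [] false false

-- ===== PORT B =====
-- the for-loop over segments[:-1]  (segment.index('(') is guarded by "'(' in segment", so it equals find)
def pvB_go : List (List Char) → Bool
  | [] => true
  | segment :: rest =>
    let s := if PySem.Chars.isIn ['('] segment
             then PySem.Chars.slice segment (some (PySem.Chars.find segment ['('])) none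
             else []
    let massif := PySem.Chars.splitOn s [' ']
    if pvCond massif then false
    else pvB_go rest

def check_for_repetition_alt (problem : String) : Bool :=
  pvB_go (PySem.List.slice (PySem.Chars.splitOn problem.toList [')']) none (some (-1)))

-- ===== PRECONDITION & SPEC =====
-- Pre_ excludes EXACTLY the inputs on which A raises IndexError: walking the ')'-closed
-- groups in order, every group reached before any triggering group keeps (from its first
-- '(' on, empty without one) at least 4 space-separated tokens; a group that triggers
-- makes A return False there and later groups are unreached (pvOk's right disjunct).
def pvOk : List (List Char) → Bool
  | [] => true
  | seg :: rest =>
    let m := PySem.Chars.splitOn (seg.dropWhile (· ≠ '(')) [' ']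
    if 4 ≤ m.length then (pvCond m || pvOk rest) else false

def Pre_check_for_repetition (problem : String) : Prop :=
  pvOk ((PySem.Chars.splitOn problem.toList [')']).dropLast) = true
instance (problem : String) : Decidable (Pre_check_for_repetition problem) := by
  unfold Pre_check_for_repetition; infer_instance

def pvWitness_check_for_repetition : String := "(a b c d)"

def Spec_check_for_repetition (problem : String) (out : Bool) : Prop := out = check_for_repetition_alt problem
instance (problem : String) (out : Bool) : Decidable (Spec_check_for_repetition problem out) := by unfold Spec_check_for_repetition; infer_instance

-- ===== CLAIM (what is proved, stated in full; the proofs are below) =====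
def Claim_equal_check_for_repetition : Prop := ∀ (problem : String), Dom_check_for_repetition problem → Pre_check_for_repetition problem → Spec_check_for_repetition problem (check_for_repetition problem)

-- ===== LEMMAS AND PROOFS =====

-- a structural single-character split, proved equal to PySem.Chars.splitOn [c]
def mySplit (c : Char) : List Char → List (List Char)
  | [] => [[]]
  | x :: xs => if x = c then [] :: mySplit c xs else (mySplit c xs).modifyHead (x :: ·)

theorem modifyHead_comp {α : Type} (f g : List α → List α) (l : List (List α)) :
    (l.modifyHead g).modifyHead f = l.modifyHead (fun t => f (g t)) := by
  cases l <;> simp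

theorem modifyHead_id' {α : Type} (l : List (List α)) : l.modifyHead (fun x => x) = l := by
  cases l <;> simp

theorem mySplit_ne_nil (c : Char) (l : List Char) : mySplit c l ≠ [] := by
  induction l with
  | nil => simp [mySplit]
  | cons x xs ih =>
    simp only [mySplit]
    split
    · simp
    · cases h : mySplit c xs with
      | nil => exact absurd h ih
      | cons a as => simp [List.modifyHead]

theorem splitOn_go_eq (c : Char) (fuel : Nat) :
    ∀ (l cur : List Char) (hacc : List (List Char)), l.length < fuel →
    PySem.Chars.splitOn.go [c] fuel l cur hacc =
      hacc.reverse ++ (mySplit c l).modifyHead (cur.reverse ++ ·) := by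
  induction fuel with
  | zero => intro l cur hacc h; omega
  | succ f ih =>
    intro l cur hacc h
    cases l with
    | nil =>
      rw [PySem.Chars.splitOn.go.eq_def]
      simp [mySplit]
    | cons x rest =>
      rw [PySem.Chars.splitOn.go.eq_def]
      by_cases hcx : c = x
      · subst hcx
        simp only [List.isPrefixOf, Bool.and_true, beq_self_eq_true, if_true]
        rw [show List.drop [c].length (c :: rest) = rest from by simp]
        rw [ih rest [] (cur.reverse :: hacc) (by simpa using Nat.lt_of_succ_lt_succ h)]
        simp [mySplit, modifyHead_id']
      · have hpre : ([c].isPrefixOf (x :: rest)) = false := by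
          simp [List.isPrefixOf, hcx]
        simp only [hpre, Bool.false_eq_true, if_false]
        rw [ih rest (x :: cur) hacc (by simpa using Nat.lt_of_succ_lt_succ h)]
        have hxc : ¬ x = c := fun hh => hcx hh.symm
        simp only [mySplit, if_neg hxc, modifyHead_comp]
        simp

theorem splitOn_single (l : List Char) (c : Char) :
    PySem.Chars.splitOn l [c] = mySplit c l := by
  unfold PySem.Chars.splitOn
  rw [splitOn_go_eq c (l.length + 1) l [] [] (by omega)]
  simp only [List.reverse_nil, List.nil_append]
  cases h : mySplit c l with
  | nil => exact absurd h (mySplit_ne_nil c l)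
  | cons a as => simp [List.modifyHead]

theorem mySplit_no_sep {c : Char} {l : List Char} (h : c ∉ l) : mySplit c l = [l] := by
  induction l with
  | nil => rfl
  | cons x xs ih =>
    simp only [List.mem_cons, not_or] at h
    simp [mySplit, Ne.symm h.1, ih h.2, List.modifyHead]

theorem mySplit_append {c : Char} {seg : List Char} (h : c ∉ seg) (rest : List Char) :
    mySplit c (seg ++ c :: rest) = seg :: mySplit c rest := by
  induction seg with
  | nil => simp [mySplit]
  | cons x xs ih =>
    simp only [List.mem_cons, not_or] at h
    rw [List.cons_append]
    simp only [mySplit, if_neg (Ne.symm h.1 : ¬ x = c), ih h.2, List.modifyHead]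

-- A never triggers on a ')'-free tail
theorem pvA_no_rparen {l : List Char} (h : ')' ∉ l) :
    ∀ string need, pvA_go l string false need = true := by
  induction l with
  | nil => intro _ _; rfl
  | cons i rest ih =>
    intro string need
    simp only [List.mem_cons, not_or] at h
    simp only [pvA_go, if_neg (Ne.symm h.1 : ¬ i = ')')]
    by_cases hp : i = '('
    · simp [hp, ih h.2]
    · simp only [if_neg hp]
      by_cases hn : need = true <;> simp [hn, ih h.2]

-- once need_to_add is on, A collects every char up to the ')'
theorem pvA_collect {seg : List Char} (h : ')' ∉ seg) (acc rest : List Char) :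
    pvA_go (seg ++ ')' :: rest) acc false true =
      (if pvCond (PySem.Chars.splitOn (acc ++ seg) [' ']) then false
       else pvA_go rest [] false false) := by
  induction seg generalizing acc with
  | nil => simp [pvA_go]
  | cons i seg' ih =>
    simp only [List.mem_cons, not_or] at h
    rw [List.cons_append]
    by_cases hp : i = '('
    · have hstep : pvA_go ('(' :: (seg' ++ ')' :: rest)) acc false true =
          pvA_go (seg' ++ ')' :: rest) (acc ++ ['(']) false true := by
        simp [pvA_go]
      rw [hp, hstep, ih h.2 (acc ++ ['('])]
      simp
    · have hne : ¬ i = ')' := fun hh => h.1 hh.symm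
      have hstep : pvA_go (i :: (seg' ++ ')' :: rest)) acc false true =
          pvA_go (seg' ++ ')' :: rest) (acc ++ [i]) false true := by
        simp [pvA_go, hne, hp]
      rw [hstep, ih h.2 (acc ++ [i])]
      simp

-- one full segment of A's loop
theorem pvA_seg {seg : List Char} (h : ')' ∉ seg) (rest : List Char) :
    pvA_go (seg ++ ')' :: rest) [] false false =
      (if pvCond (PySem.Chars.splitOn (seg.dropWhile (· ≠ '(')) [' ']) then false
       else pvA_go rest [] false false) := by
  induction seg with
  | nil => simp [pvA_go, List.dropWhile]
  | cons i seg' ih =>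
    simp only [List.mem_cons, not_or] at h
    rw [List.cons_append]
    by_cases hp : i = '('
    · have hstep : pvA_go ('(' :: (seg' ++ ')' :: rest)) [] false false =
          pvA_go (seg' ++ ')' :: rest) ['('] false true := by
        simp [pvA_go]
      rw [hp, hstep, pvA_collect h.2 ['('] rest]
      simp [List.dropWhile]
    · have hne : ¬ i = ')' := fun hh => h.1 hh.symm
      have hstep : pvA_go (i :: (seg' ++ ')' :: rest)) [] false false =
          pvA_go (seg' ++ ')' :: rest) [] false false := by
        simp [pvA_go, hne, hp]
      rw [hstep, ih h.2]
      have hdw : (i :: seg').dropWhile (· ≠ '(') = seg'.dropWhile (· ≠ '(') := by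
        simp [List.dropWhile, hp]
      rw [hdw]

-- B's kept part of a segment is the suffix from the first '('
theorem dropWhile_eq_drop {seg : List Char} {k : Nat} (hk : k < seg.length)
    (h1 : ∀ i, i < k → ∀ (hi : i < seg.length), seg[i] ≠ '(') (h2 : seg[k] = '(') :
    seg.dropWhile (· ≠ '(') = seg.drop k := by
  induction seg generalizing k with
  | nil => simp at hk
  | cons x xs ih =>
    cases k with
    | zero =>
      simp at h2
      simp [List.dropWhile, h2]
    | succ k' =>
      have hx : x ≠ '(' := by
        have := h1 0 (Nat.succ_pos _) (by simp)
        simpa using this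
      rw [List.dropWhile_cons_of_pos (by simp [hx]), List.drop_succ_cons]
      simp only [List.length_cons, Nat.succ_lt_succ_iff] at hk
      have h2' : xs[k'] = '(' := by simpa using h2
      refine (ih hk ?_ h2')
      intro i hi hilen
      have := h1 (i + 1) (Nat.succ_lt_succ hi) (by simpa using Nat.succ_lt_succ hilen)
      simpa using this

theorem pvB_s_eq (seg : List Char) :
    (if PySem.Chars.isIn ['('] seg
     then PySem.Chars.slice seg (some (PySem.Chars.find seg ['('])) none
     else []) = seg.dropWhile (· ≠ '(') := by
  by_cases hin : PySem.Chars.isIn ['('] seg = true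
  · rw [if_pos hin]
    have hinf : ['('] <:+: seg := (PySem.Chars.isIn_iff_infix _ _).mp hin
    have hpos : (0 : Int) ≤ PySem.Chars.find seg ['('] := (PySem.Chars.find_nonneg_iff _ _).mpr hinf
    obtain ⟨hpre, hmin⟩ := PySem.Chars.find_spec hpos
    set k := (PySem.Chars.find seg ['(']).toNat with hk
    obtain ⟨t, ht⟩ := hpre
    have hkl : k < seg.length := by
      by_contra hc
      rw [List.drop_eq_nil_of_le (Nat.le_of_not_lt hc)] at ht
      simp at ht
    have hgk : seg[k] = '(' := by
      have h0 : (seg.drop k)[0]'(by rw [← ht]; simp) = '(' := by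
        simp [← ht]
      simpa using h0
    have h1 : ∀ i, i < k → ∀ hi : i < seg.length, seg[i] ≠ '(' := by
      intro i hik hi hEq
      refine hmin i hik ⟨seg.drop (i + 1), ?_⟩
      rw [List.drop_eq_getElem_cons hi, hEq]
      rfl
    rw [dropWhile_eq_drop hkl h1 hgk]
    have hfk : PySem.Chars.find seg ['('] = (k : Int) := (Int.toNat_of_nonneg hpos).symm
    rw [hfk]
    simp [PySem.List.slice_from_natCast]
  · rw [if_neg hin]
    have hninf : ¬ ['('] <:+: seg := by
      rw [← PySem.Chars.isIn_iff_infix]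
      simpa using hin
    have hnm : '(' ∉ seg := by
      intro hm
      obtain ⟨s, t, hst⟩ := List.append_of_mem hm
      exact hninf ⟨s, t, by rw [hst]; simp⟩
    symm
    rw [List.dropWhile_eq_nil_iff]
    intro x hx
    simp only [ne_eq, decide_eq_true_eq]
    exact fun he => hnm (he ▸ hx)

-- one step of B's loop rewritten through dropWhile
theorem pvB_go_cons (seg : List Char) (rest : List (List Char)) :
    pvB_go (seg :: rest) =
      (if pvCond (PySem.Chars.splitOn (seg.dropWhile (· ≠ '(')) [' ']) then false
       else pvB_go rest) := by
  simp only [pvB_go]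
  rw [pvB_s_eq]

-- the main equivalence, by strong induction on the length
theorem pv_main : ∀ (n : Nat) (cs : List Char), cs.length ≤ n →
    pvA_go cs [] false false = pvB_go ((mySplit ')' cs).dropLast) := by
  intro n
  induction n with
  | zero =>
    intro cs h
    have : cs = [] := by cases cs <;> simp_all
    subst this
    simp [pvA_go, mySplit, pvB_go]
  | succ n ih =>
    intro cs hlen
    by_cases hmem : ')' ∈ cs
    · -- split cs at the first ')'
      set seg := cs.takeWhile (· ≠ ')') with hseg
      have hdw : cs.dropWhile (· ≠ ')') ≠ [] := by
        simp only [ne_eq, List.dropWhile_eq_nil_iff]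
        intro hall
        have := hall ')' hmem
        simp at this
      have hhead : (cs.dropWhile (· ≠ ')')).head hdw = ')' := by
        have := List.head_dropWhile_not (fun x : Char => x ≠ ')') hdw
        simpa using this
      set rest := (cs.dropWhile (· ≠ ')')).tail with hrest
      have hcs : cs = seg ++ ')' :: rest := by
        conv_lhs => rw [← List.takeWhile_append_dropWhile (p := fun x => x ≠ ')') (l := cs)]
        rw [← hseg, ← List.cons_head_tail hdw, hhead, ← hrest]
      have hns : ')' ∉ seg := by
        intro hin
        have := List.mem_takeWhile_imp (l := cs) (p := fun x => x ≠ ')') hin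
        simp at this
      have hrl : rest.length ≤ n := by
        have := hlen
        rw [hcs] at this
        simp only [List.length_append, List.length_cons] at this
        omega
      rw [hcs, pvA_seg hns, mySplit_append hns,
          List.dropLast_cons_of_ne_nil (mySplit_ne_nil ')' rest), pvB_go_cons]
      rw [ih rest hrl]
    · rw [pvA_no_rparen hmem, mySplit_no_sep hmem]
      simp [pvB_go]

-- ===== VERDICT (by name: the statement is the Claim_ definition above) =====
theorem check_for_repetition_spec : Claim_equal_check_for_repetition := by
  intro problem _hdom _hpre
  unfold Spec_check_for_repetition check_for_repetition check_for_repetition_alt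
  rw [splitOn_single, PySem.List.slice_to_neg_one]
  exact pv_main (problem.toList.length) problem.toList le_rfl
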